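-- pv_equiv track=rewrite | github.com/andrazrepar/hanh_paper_eval | doublecheck_hanh_results.py | find_sequence_indices
-- ===== SOURCE A (Python) =====
-- def find_sequence_indices(lst):
--     sequences = []
--     sequence = []
--
--     for i, item in enumerate(lst):
--         if item == "B-T":
--             # Start of a new sequence
--             if sequence:  # Check if sequence is not empty
--                 sequences.append(sequence)
--             sequence = [i]
--         elif item == "T" and sequence:  # Check if we're inside a sequence
--             # Continuation of a sequence
--             sequence.append(i)
--         else:  # End of a sequence or 'n'
--             if sequence:  # Check if sequence is not empty
--                 sequences.append(sequence)
--                 sequence = []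
--
--     # Append the last sequence if it ended with 'T' or 'B-T'
--     if sequence:
--         sequences.append(sequence)
--
--     return sequences
-- ===== SOURCE B (Python) =====
-- def find_sequence_indices(lst):
--     sequences = []
--     n = len(lst)
--     i = 0
--     while i < n:
--         if lst[i] == "B-T":
--             seq = [i]
--             j = i + 1
--             while j < n and lst[j] == "T":
--                 seq.append(j)
--                 j += 1
--             sequences.append(seq)
--             i = j
--         else:
--             i += 1
--     return sequences
-- ===== Notes on version B (the rewrite author's own statement) =====
-- stated objective: alternative
-- what changed: Replaced the flat per-item state machine carrying an open-sequence accumulator by an index-driven scan: an outer while loop looks for a 'B-T' start and an inner while loop extends the run over consecutive 'T' indices, resuming the outer scan at the stop point.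
import Mathlib
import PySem

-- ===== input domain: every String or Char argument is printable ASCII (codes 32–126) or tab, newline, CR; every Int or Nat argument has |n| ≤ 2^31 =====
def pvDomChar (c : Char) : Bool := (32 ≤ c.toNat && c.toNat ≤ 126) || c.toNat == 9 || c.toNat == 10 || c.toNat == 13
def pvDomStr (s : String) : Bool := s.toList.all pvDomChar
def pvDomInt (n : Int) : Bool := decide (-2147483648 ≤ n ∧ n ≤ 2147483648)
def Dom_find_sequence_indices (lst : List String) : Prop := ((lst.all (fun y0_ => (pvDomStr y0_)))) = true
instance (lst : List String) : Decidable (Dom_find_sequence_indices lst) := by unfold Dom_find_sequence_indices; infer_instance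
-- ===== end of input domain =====

-- B replaces A's flat per-item state machine by an outer scan-for-'B-T' / inner extend-run
-- index loop (alternative decomposition, same O(n) cost).


-- ===== PORT A =====
-- one iteration of A's for-loop: state = (sequences, sequence)
def pvStepA (st : List (List Int) × List Int) (p : Int × String) : List (List Int) × List Int :=
  if p.2 = "B-T" then
    ((if st.2 = [] then st.1 else st.1 ++ [st.2]), [p.1])
  else if p.2 = "T" ∧ st.2 ≠ [] then
    (st.1, st.2 ++ [p.1])
  else
    if st.2 = [] then st else (st.1 ++ [st.2], [])

def find_sequence_indices (lst : List String) : List (List Int) :=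
  let r := (PySem.List.enumerate lst 0).foldl pvStepA ([], [])
  if r.2 = [] then r.1 else r.1 ++ [r.2]

-- ===== PORT B =====
-- inner while loop: extend seq with consecutive 'T' indices from j; returns (seq, stop index)
def pvAltRun (lst : List String) (seq : List Int) (j : Nat) : List Int × Nat :=
  if h : j < lst.length ∧ lst.getD j "" = "T" then
    pvAltRun lst (seq ++ [(j : Int)]) (j + 1)
  else (seq, j)
termination_by lst.length - j
decreasing_by omega

theorem pvAltRun_snd_ge (lst : List String) (seq : List Int) (j : Nat) :
    j ≤ (pvAltRun lst seq j).2 := by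
  fun_induction pvAltRun lst seq j with
  | case1 seq j h ih => omega
  | case2 seq j h => simp

-- outer while loop over index i
def pvAltOuter (lst : List String) (i : Nat) : List (List Int) :=
  if h : i < lst.length then
    if lst.getD i "" = "B-T" then
      let r := pvAltRun lst [(i : Int)] (i + 1)
      r.1 :: pvAltOuter lst r.2
    else pvAltOuter lst (i + 1)
  else []
termination_by lst.length - i
decreasing_by
  · have := pvAltRun_snd_ge lst [(i : Int)] (i + 1); omega
  · omega

def find_sequence_indices_alt (lst : List String) : List (List Int) :=
  pvAltOuter lst 0

-- ===== PRECONDITION & SPEC =====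
def Spec_find_sequence_indices (lst : List String) (out : List (List Int)) : Prop := out = find_sequence_indices_alt lst
instance (lst : List String) (out : List (List Int)) : Decidable (Spec_find_sequence_indices lst out) := by unfold Spec_find_sequence_indices; infer_instance

-- ===== CLAIM (what is proved, stated in full; the proofs are below) =====
def Claim_equal_find_sequence_indices : Prop := ∀ (lst : List String), Dom_find_sequence_indices lst → Spec_find_sequence_indices lst (find_sequence_indices lst)

-- ===== LEMMAS AND PROOFS =====

-- A's fold over the suffix of lst starting at index j
def pvFoldA (lst : List String) (st : List (List Int) × List Int) (j : Nat) :
    List (List Int) × List Int :=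
  (PySem.List.enumerate (lst.drop j) (j : Int)).foldl pvStepA st

-- A's final flush
def pvFinish (st : List (List Int) × List Int) : List (List Int) :=
  if st.2 = [] then st.1 else st.1 ++ [st.2]

theorem pvFoldA_stop (lst : List String) (st : List (List Int) × List Int) (j : Nat)
    (h : lst.length ≤ j) : pvFoldA lst st j = st := by
  simp [pvFoldA, List.drop_eq_nil_of_le h]

theorem pvFoldA_cons (lst : List String) (st : List (List Int) × List Int) (j : Nat)
    (h : j < lst.length) :
    pvFoldA lst st j = pvFoldA lst (pvStepA st ((j : Int), lst[j])) (j + 1) := by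
  simp only [pvFoldA, List.drop_eq_getElem_cons h, PySem.List.enumerate_cons, List.foldl_cons]
  norm_num

-- a run in progress: A's remaining fold equals flushing the fully extended run
theorem pvRun_lemma (lst : List String) (j : Nat) (seq : List Int) (acc : List (List Int))
    (hs : seq ≠ []) :
    pvFinish (pvFoldA lst (acc, seq) j) =
      pvFinish (pvFoldA lst (acc ++ [(pvAltRun lst seq j).1], []) (pvAltRun lst seq j).2) := by
  fun_induction pvAltRun lst seq j with
  | case1 seq j h ih =>
    rw [pvFoldA_cons lst (acc, seq) j h.1]
    have hitem : lst[j] = "T" := by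
      have := h.2; rwa [List.getD_eq_getElem _ _ h.1] at this
    have hne : ¬ ("T" : String) = "B-T" := by decide
    simp only [pvStepA, hitem, hne, if_false, ne_eq, hs, not_false_eq_true, and_self, if_true]
    exact ih (by simp)
  | case2 seq j h =>
    by_cases hj : j < lst.length
    · have hT : ¬ lst[j] = "T" := by
        intro hT; exact h ⟨hj, by rw [List.getD_eq_getElem _ _ hj]; exact hT⟩
      rw [pvFoldA_cons lst (acc, seq) j hj, pvFoldA_cons lst (acc ++ [seq], []) j hj]
      by_cases hB : lst[j] = "B-T"
      · simp [pvStepA, hB, hs]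
      · have : ¬ ((lst[j] = "T") ∧ seq ≠ []) := by tauto
        simp [pvStepA, hB, hs, hT]
    · rw [pvFoldA_stop lst _ j (by omega), pvFoldA_stop lst _ j (by omega)]
      simp [pvFinish, hs]

-- no run in progress: A's remaining fold equals acc ++ B's outer scan from j
theorem pvMain_lemma (lst : List String) (j : Nat) (acc : List (List Int)) :
    pvFinish (pvFoldA lst (acc, []) j) = acc ++ pvAltOuter lst j := by
  fun_induction pvAltOuter lst j generalizing acc with
  | case1 j h hB r ih =>
    have hitem : lst[j] = "B-T" := by
      have := hB; rwa [List.getD_eq_getElem _ _ h] at this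
    rw [pvFoldA_cons lst (acc, []) j h]
    simp only [pvStepA, hitem]
    norm_num
    rw [pvRun_lemma lst (j + 1) [(j : Int)] acc (by simp)]
    rw [ih]
    simp
    rfl
  | case2 j h hB ih =>
    rw [pvFoldA_cons lst (acc, []) j h]
    have hBne : ¬ lst[j] = "B-T" := by
      intro hc; exact hB (by rw [List.getD_eq_getElem _ _ h]; exact hc)
    have : ¬ ((lst[j] = "T") ∧ ([] : List Int) ≠ []) := by simp
    simp only [pvStepA, hBne, if_false, this, if_true]
    exact ih acc
  | case3 j h =>
    rw [pvFoldA_stop lst _ j (by omega)]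
    simp [pvFinish]

-- ===== VERDICT (by name: the statement is the Claim_ definition above) =====
theorem find_sequence_indices_spec : Claim_equal_find_sequence_indices := by
  intro lst _
  show find_sequence_indices lst = find_sequence_indices_alt lst
  have h := pvMain_lemma lst 0 []
  simp only [pvFoldA, List.drop_zero, Nat.cast_zero, List.nil_append] at h
  simpa [find_sequence_indices, find_sequence_indices_alt, pvFinish] using h
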